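-- pv_equiv track=rewrite | github.com/kyungmin0616/coastal-ocean-utils | dataset/ERA5/make_sflux_era5.py | _assign_key_groups
-- ===== SOURCE A (Python) =====
-- def _assign_key_groups(keys, size):
--     # Group contiguous stacks with the same file-key, then assign groups
--     # greedily to the least-loaded rank.
--     if not keys:
--         return [set() for _ in range(size)]
--     groups = []
--     g_start = 0
--     g_key = keys[0]
--     for i in range(1, len(keys)):
--         if keys[i] != g_key:
--             groups.append(list(range(g_start, i)))
--             g_start = i
--             g_key = keys[i]
--     groups.append(list(range(g_start, len(keys))))
--
--     assigns = [set() for _ in range(size)]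
--     loads = [0] * size
--     for g in groups:
--         r = min(range(size), key=lambda x: loads[x])
--         assigns[r].update(g)
--         loads[r] += len(g)
--     return assigns
-- ===== SOURCE B (Python) =====
-- # B: boundary-list grouping + a sorted work-queue of (load, rank) pairs: pop the front
-- # (least-loaded, lowest rank), re-insert at its binary-search position, instead of
-- # re-scanning all rank loads for the minimum at every group.
-- def _insort(q, item):
--     lo, hi = 0, len(q)
--     while lo < hi:
--         mid = (lo + hi) // 2
--         if q[mid] <= item:
--             lo = mid + 1
--         else:
--             hi = mid
--     q.insert(lo, item)
--
--
-- def _assign_key_groups(keys, size):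
--     assigns = [set() for _ in range(size)]
--     if not keys:
--         return assigns
--     n = len(keys)
--     bounds = [0] + [i for i in range(1, n) if keys[i] != keys[i - 1]] + [n]
--     q = [(0, r) for r in range(size)]
--     for s, e in zip(bounds, bounds[1:]):
--         load, r = q.pop(0)
--         _insort(q, (load + (e - s), r))
--         assigns[r].update(range(s, e))
--     return assigns
-- ===== Notes on version B (the rewrite author's own statement) =====
-- stated objective: faster
-- what changed: B finds group boundaries as an index list (one comprehension) and replaces A's per-group min-scan over all rank loads by a sorted queue of (load, rank) pairs: pop the front (least-loaded, lowest-rank) and re-insert the updated pair at its binary-search position.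
import Mathlib
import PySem

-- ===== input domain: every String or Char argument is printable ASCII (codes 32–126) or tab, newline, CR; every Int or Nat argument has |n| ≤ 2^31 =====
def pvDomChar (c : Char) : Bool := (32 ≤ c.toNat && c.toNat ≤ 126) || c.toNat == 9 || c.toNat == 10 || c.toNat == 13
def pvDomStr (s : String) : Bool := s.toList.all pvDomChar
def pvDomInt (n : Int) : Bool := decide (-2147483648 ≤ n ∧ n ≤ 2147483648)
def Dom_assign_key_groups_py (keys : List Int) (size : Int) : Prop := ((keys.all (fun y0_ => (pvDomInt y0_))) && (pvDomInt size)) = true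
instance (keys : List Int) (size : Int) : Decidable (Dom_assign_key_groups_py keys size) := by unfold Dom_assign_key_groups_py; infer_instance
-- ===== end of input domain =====

-- B replaces the per-group scan of all ranks for the minimum load by a sorted work-queue
-- of (load, rank) pairs (pop the front, re-insert by binary search); objective: faster.

-- ===== PORT A =====
def assign_key_groups_py (keys : List Int) (size : Int) : List (List Int) :=
  if keys = [] then
    (PySem.List.pyRange 0 size 1).map (fun _ => ([] : List Int))
  else
    let n : Int := keys.length
    let st := (PySem.List.pyRange 1 n 1).foldl
      (fun (st : List (List Int) × Int × Int) i =>
        if PySem.List.pyGetD keys i 0 ≠ st.2.2 then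
          (st.1 ++ [PySem.List.pyRange st.2.1 i 1], i, PySem.List.pyGetD keys i 0)
        else st)
      ([], 0, PySem.List.pyGetD keys 0 0)
    let groups := st.1 ++ [PySem.List.pyRange st.2.1 n 1]
    let assigns : List (List Int) := (PySem.List.pyRange 0 size 1).map (fun _ => [])
    let loads : List Int := List.replicate size.toNat 0      -- [0] * size
    (groups.foldl
      (fun (st : List (List Int) × List Int) g =>
        -- r = min(range(size), key=lambda x: loads[x]); min of an empty range raises
        -- (ValueError), excluded by Pre_, so the '.getD 0' default is never used there
        let r := (PySem.List.min? (PySem.List.pyRange 0 size 1)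
                   (fun x => PySem.List.pyGetD st.2 x 0)).getD 0
        (PySem.List.pySetD st.1 r (PySem.Set.update (PySem.List.pyGetD st.1 r []) g),
         PySem.List.pySetD st.2 r (PySem.List.pyGetD st.2 r 0 + (g.length : Int))))
      (assigns, loads)).1

-- ===== PORT B =====
-- Python tuple comparison 'p <= q' on (int, int) pairs (lexicographic)
def pvLeP (p q : Int × Int) : Bool := p.1 < q.1 || (p.1 == q.1 && p.2 ≤ q.2)

-- the hand-written binary-search loop of Source B's _insort (while lo < hi: …)
def pvBisect (q : List (Int × Int)) (item : Int × Int) (lo hi : Int) : Int :=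
  if h : lo < hi then
    let mid := PySem.Int.floordiv (lo + hi) 2
    if pvLeP (PySem.List.pyGetD q mid (0, 0)) item then pvBisect q item (mid + 1) hi
    else pvBisect q item lo mid
  else lo
termination_by (hi - lo).toNat
decreasing_by
  · have h1 := PySem.Int.floordiv_two_mid_bounds (le_of_lt h)
    omega
  · have h1 := PySem.Int.floordiv_two_mid_bounds (le_of_lt h)
    have h2 : PySem.Int.floordiv (lo + hi) 2 < hi :=
      (PySem.Int.floordiv_lt_iff_lt_mul (by omega)).mpr (by omega)
    omega

def assign_key_groups_py_alt (keys : List Int) (size : Int) : List (List Int) :=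
  let assigns : List (List Int) := (PySem.List.pyRange 0 size 1).map (fun _ => [])
  if keys = [] then assigns
  else
    let n : Int := keys.length
    let bounds := [(0 : Int)] ++ ((PySem.List.pyRange 1 n 1).filter
        (fun i => PySem.List.pyGetD keys i 0 != PySem.List.pyGetD keys (i - 1) 0)) ++ [n]
    let q := (PySem.List.pyRange 0 size 1).map (fun r => ((0 : Int), r))
    ((bounds.zip (PySem.List.slice bounds (some 1) none)).foldl
      (fun (st : List (List Int) × List (Int × Int)) p =>
        -- load, r = q.pop(0); q is nonempty under Pre_, so the default is never used there
        let pop := (PySem.List.pop? st.2 0).getD ((0, 0), [])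
        let item := (pop.1.1 + (p.2 - p.1), pop.1.2)
        let q' := PySem.List.insert pop.2 (pvBisect pop.2 item 0 pop.2.length) item
        (PySem.List.pySetD st.1 pop.1.2
           (PySem.Set.update (PySem.List.pyGetD st.1 pop.1.2 []) (PySem.List.pyRange p.1 p.2 1)),
         q'))
      (assigns, q)).1

-- ===== PRECONDITION & SPEC =====
-- When keys is nonempty and size ≤ 0, A raises ValueError (min() of the empty range(size));
-- B's pop of the empty queue raises IndexError there too. Pre_ excludes exactly those inputs.
def Pre_assign_key_groups_py (keys : List Int) (size : Int) : Prop := keys = [] ∨ 1 ≤ size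
instance (keys : List Int) (size : Int) : Decidable (Pre_assign_key_groups_py keys size) := by
  unfold Pre_assign_key_groups_py; infer_instance
def pvWitness_assign_key_groups_py : List Int × Int := ([1, 1, 2], 2)

def Spec_assign_key_groups_py (keys : List Int) (size : Int) (out : List (List Int)) : Prop := out = assign_key_groups_py_alt keys size
instance (keys : List Int) (size : Int) (out : List (List Int)) : Decidable (Spec_assign_key_groups_py keys size out) := by unfold Spec_assign_key_groups_py; infer_instance

-- ===== CLAIM (what is proved, stated in full; the proofs are below) =====
def Claim_equal_assign_key_groups_py : Prop := ∀ (keys : List Int) (size : Int), Dom_assign_key_groups_py keys size → Pre_assign_key_groups_py keys size → Spec_assign_key_groups_py keys size (assign_key_groups_py keys size)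


-- ===== LEMMAS AND PROOFS =====

-- pvLeP is a total preorder (lexicographic ≤ on pairs)
lemma pvLeP_iff (a b : Int × Int) : pvLeP a b = true ↔ (a.1 < b.1 ∨ (a.1 = b.1 ∧ a.2 ≤ b.2)) := by
  simp [pvLeP]

lemma pvLeP_trans {a b c : Int × Int} (h1 : pvLeP a b = true) (h2 : pvLeP b c = true) :
    pvLeP a c = true := by
  rw [pvLeP_iff] at *; omega

lemma pvLeP_of_not {a b : Int × Int} (h : pvLeP a b = false) : pvLeP b a = true := by
  rw [pvLeP_iff]
  have h2 := pvLeP_iff a b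
  rw [h] at h2
  simp only [Bool.false_eq_true, false_iff] at h2
  omega

-- PySem.List.insert at an in-range index is take ++ item :: drop
lemma pvInsert_eq (t : List (Int × Int)) (k : Int) (item : Int × Int)
    (h0 : 0 ≤ k) (hk : k ≤ t.length) :
    PySem.List.insert t k item = t.take k.toNat ++ item :: t.drop k.toNat := by
  simp only [PySem.List.insert, PySem.List.sliceIndices]
  have h1 : ¬ ((1:Int) < 0) := by omega
  have h2 : ¬ (k < 0) := by omega
  simp only [if_neg h1, if_neg h2]
  have h3 : min k (t.length : Int) = k := by omega
  simp [h3]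

-- the binary-search loop: invariant and final characterisation
lemma pvBisect_spec (t : List (Int × Int)) (item : Int × Int)
    (hsort : List.Pairwise (fun a b => pvLeP a b = true) t) :
    ∀ (d : Nat) (lo hi : Int), (hi - lo).toNat = d → 0 ≤ lo → lo ≤ hi → hi ≤ t.length →
    (∀ j : Nat, (j : Int) < lo → ∀ hj : j < t.length, pvLeP t[j] item = true) →
    (∀ j : Nat, hi ≤ (j : Int) → ∀ hj : j < t.length, pvLeP t[j] item = false) →
    0 ≤ pvBisect t item lo hi ∧ pvBisect t item lo hi ≤ t.length ∧
    (∀ j : Nat, (j : Int) < pvBisect t item lo hi → ∀ hj : j < t.length, pvLeP t[j] item = true) ∧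
    (∀ j : Nat, pvBisect t item lo hi ≤ (j : Int) → ∀ hj : j < t.length, pvLeP t[j] item = false) := by
  intro d
  induction d using Nat.strong_induction_on with
  | _ d ih =>
    intro lo hi hd h0 hlh hhl hlow hhigh
    rw [pvBisect]
    by_cases h : lo < hi
    · rw [dif_pos h]
      have hb := PySem.Int.floordiv_two_mid_bounds (le_of_lt h)
      have hmlt : PySem.Int.floordiv (lo + hi) 2 < hi :=
        (PySem.Int.floordiv_lt_iff_lt_mul (by omega)).mpr (by omega)
      set mid := PySem.Int.floordiv (lo + hi) 2 with hmid
      have hmnn : 0 ≤ mid := by omega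
      have hmidlen : mid.toNat < t.length := by omega
      have hget : PySem.List.pyGetD t mid (0, 0) = t[mid.toNat] := by
        rw [PySem.List.pyGetD_of_nonneg _ _ hmnn, List.getD_eq_getElem _ _ hmidlen]
      have hpw := List.pairwise_iff_getElem.mp hsort
      simp only [hget]
      by_cases hp : pvLeP t[mid.toNat] item = true
      · rw [if_pos hp]
        apply ih (hi - (mid + 1)).toNat (by omega) (mid + 1) hi rfl (by omega) (by omega) hhl
        · intro j hj hjlen
          by_cases hj2 : (j : Int) < lo
          · exact hlow j hj2 hjlen
          · rcases Nat.lt_or_ge j mid.toNat with hlt | hge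
            · exact pvLeP_trans (hpw j mid.toNat hjlen hmidlen hlt) hp
            · have hje : t[j] = t[mid.toNat] := by congr 1; omega
              rw [hje]; exact hp
        · exact hhigh
      · rw [if_neg hp]
        apply ih (mid - lo).toNat (by omega) lo mid rfl h0 (by omega) (by omega) hlow
        intro j hj hjlen
        have hpm : pvLeP t[mid.toNat] item = false := by
          cases hpm2 : pvLeP t[mid.toNat] item
          · rfl
          · exact absurd hpm2 hp
        cases hc : pvLeP t[j] item
        · rfl
        · exfalso
          rcases Nat.lt_or_ge mid.toNat j with hlt | hge
          · have := pvLeP_trans (hpw mid.toNat j hmidlen hjlen hlt) hc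
            rw [hpm] at this; exact Bool.false_ne_true this
          · have hje : t[j] = t[mid.toNat] := by congr 1; omega
            rw [hje, hpm] at hc; exact Bool.false_ne_true hc
    · rw [dif_neg h]
      have heq : lo = hi := by omega
      refine ⟨h0, by omega, ?_, ?_⟩
      · intro j hj hjlen; exact hlow j hj hjlen
      · intro j hj hjlen; exact hhigh j (by omega) hjlen

-- inserting at the binary-search position keeps the queue sorted and is a push
lemma pvIns_sorted_perm (t : List (Int × Int)) (item : Int × Int)
    (hsort : List.Pairwise (fun a b => pvLeP a b = true) t) :
    List.Pairwise (fun a b => pvLeP a b = true)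
        (PySem.List.insert t (pvBisect t item 0 t.length) item) ∧
      (PySem.List.insert t (pvBisect t item 0 t.length) item).Perm (item :: t) := by
  obtain ⟨hk0, hkl, hpred, hnpred⟩ :=
    pvBisect_spec t item hsort ((t.length : Int) - 0).toNat 0 t.length rfl le_rfl
      (by omega) le_rfl (by intro j hj hjl; omega) (by intro j hj hjl; omega)
  set k := pvBisect t item 0 (t.length : Int) with hk
  rw [pvInsert_eq t k item hk0 hkl]
  have hlentake : (t.take k.toNat).length = k.toNat := by
    rw [List.length_take]; omega
  have hpw := List.pairwise_iff_getElem.mp hsort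
  constructor
  · rw [List.pairwise_append]
    refine ⟨List.Pairwise.sublist (List.take_sublist _ _) hsort, ?_, ?_⟩
    · rw [List.pairwise_cons]
      refine ⟨?_, List.Pairwise.sublist (List.drop_sublist _ _) hsort⟩
      intro b hb
      obtain ⟨i, hi, hbe⟩ := List.mem_iff_getElem.mp hb
      subst hbe
      rw [List.getElem_drop]
      have hlen : k.toNat + i < t.length := by
        have := hi; rw [List.length_drop] at this; omega
      exact pvLeP_of_not (hnpred (k.toNat + i) (by omega) hlen)
    · intro a ha b hb
      obtain ⟨i, hi, hae⟩ := List.mem_iff_getElem.mp ha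
      subst hae
      have hikn : i < k.toNat := by omega
      have hilen : i < t.length := by
        have := hi; rw [List.length_take] at this; omega
      rw [List.getElem_take]
      rcases List.mem_cons.mp hb with rfl | hb2
      · exact hpred i (by omega) hilen
      · obtain ⟨i2, hi2, hbe⟩ := List.mem_iff_getElem.mp hb2
        subst hbe
        rw [List.getElem_drop]
        have hlen2 : k.toNat + i2 < t.length := by
          have := hi2; rw [List.length_drop] at this; omega
        exact hpw i (k.toNat + i2) hilen hlen2 (by omega)
  · have hp : (t.take k.toNat ++ item :: t.drop k.toNat).Perm
        (item :: (t.take k.toNat ++ t.drop k.toNat)) := List.perm_middle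
    rw [List.take_append_drop] at hp
    exact hp

-- Python's min keeps the FIRST extremal element: characterisation of its fold over an
-- increasing list of candidates
lemma pvMinFold_good (key : Int → Int) :
    ∀ (t : List Int) (a : Int), t.Pairwise (· < ·) → (∀ y ∈ t, a < y) →
    ∃ m, t.foldl (fun acc x => match acc with
          | none => some x
          | some mm => if key x < key mm then some x else some mm) (some a) = some m ∧
      (m = a ∨ m ∈ t) ∧ key m ≤ key a ∧ (∀ y ∈ t, key m ≤ key y) ∧
      (a < m → key m < key a) ∧ (∀ y ∈ t, y < m → key m < key y) := by
  intro t
  induction t with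
  | nil =>
    intro a _ _
    exact ⟨a, rfl, Or.inl rfl, le_rfl, by simp, by omega, by simp⟩
  | cons y t' ih =>
    intro a hpw hlt
    rcases List.pairwise_cons.mp hpw with ⟨hy, hpw'⟩
    by_cases hc : key y < key a
    · obtain ⟨m, hfold, hmem, hle, hall, hstrul, hstr⟩ := ih y hpw' hy
      refine ⟨m, ?_, ?_, ?_, ?_, ?_, ?_⟩
      · simpa [hc] using hfold
      · rcases hmem with rfl | hm
        · exact Or.inr (by simp)
        · exact Or.inr (by simp [hm])
      · omega
      · intro z hz
        rcases List.mem_cons.mp hz with rfl | hz2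
        · exact hle
        · exact hall z hz2
      · intro _; omega
      · intro z hz hzm
        rcases List.mem_cons.mp hz with rfl | hz2
        · -- z = y, y < m : m ≠ y so m ∈ t'
          rcases hmem with rfl | hm
          · omega
          · exact hstrul hzm
        · exact hstr z hz2 hzm
    · obtain ⟨m, hfold, hmem, hle, hall, hstrul, hstr⟩ := ih a hpw'
        (fun z hz => lt_trans (hlt y (by simp)) (hy z hz))
      refine ⟨m, ?_, ?_, ?_, ?_, ?_, ?_⟩
      · simpa [hc] using hfold
      · rcases hmem with rfl | hm
        · exact Or.inl rfl
        · exact Or.inr (by simp [hm])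
      · exact hle
      · intro z hz
        rcases List.mem_cons.mp hz with rfl | hz2
        · omega
        · exact hall z hz2
      · exact hstrul
      · intro z hz hzm
        rcases List.mem_cons.mp hz with rfl | hz2
        · -- z = y, y < m; a < y so a < m
          have hay : a < z := hlt z (by simp)
          have := hstrul (by omega)
          omega
        · exact hstr z hz2 hzm

lemma pvMin_first (loads : List Int) (size : Int) (hs : 1 ≤ size) :
    ∃ r, PySem.List.min? (PySem.List.pyRange 0 size 1)
        (fun x => PySem.List.pyGetD loads x 0) = some r ∧
      0 ≤ r ∧ r < size ∧
      (∀ y, 0 ≤ y → y < size →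
        PySem.List.pyGetD loads r 0 ≤ PySem.List.pyGetD loads y 0) ∧
      (∀ y, 0 ≤ y → y < r →
        PySem.List.pyGetD loads r 0 < PySem.List.pyGetD loads y 0) := by
  have hcons : PySem.List.pyRange 0 size 1 = 0 :: PySem.List.pyRange 1 size 1 :=
    PySem.List.pyRange_one_cons (by omega)
  have hpw : (PySem.List.pyRange 1 size 1).Pairwise (· < ·) :=
    PySem.List.pairwise_lt_pyRange_one 1 size
  have hmem : ∀ y ∈ PySem.List.pyRange 1 size 1, (0 : Int) < y := by
    intro y hy
    have := PySem.List.mem_pyRange_one.mp hy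
    omega
  obtain ⟨m, hfold, hm, hlea, hall, hstrul, hstr⟩ :=
    pvMinFold_good (fun x => PySem.List.pyGetD loads x 0) (PySem.List.pyRange 1 size 1) 0 hpw hmem
  have hm0 : 0 ≤ m ∧ m < size := by
    rcases hm with rfl | hm
    · omega
    · have := PySem.List.mem_pyRange_one.mp hm; omega
  refine ⟨m, ?_, hm0.1, hm0.2, ?_, ?_⟩
  · rw [hcons]
    simp only [PySem.List.min?, List.foldl_cons]
    have hfun : ∀ (f g : Option Int → Int → Option Int), f = g →
        List.foldl f (some (0:Int)) (PySem.List.pyRange 1 size 1) = some m →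
        List.foldl g (some (0:Int)) (PySem.List.pyRange 1 size 1) = some m := by
      intro f g hfg h; rw [← hfg]; exact h
    refine hfun _ _ ?_ hfold
    funext acc x
    cases acc <;> rfl
  · intro y h0 hy
    by_cases hy0 : y = 0
    · subst hy0; exact hlea
    · exact hall y (PySem.List.mem_pyRange_one.mpr (by omega))
  · intro y h0 hy
    by_cases hy0 : y = 0
    · subst hy0; exact hstrul (by omega)
    · exact hstr y (PySem.List.mem_pyRange_one.mpr (by omega)) hy

-- the multiset of (load, rank) pairs that the queue tracks
def pvPairs (L : List Int) : List (Int × Int) :=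
  (List.range L.length).map (fun i => (L.getD i 0, (i : Int)))

lemma pvPairs_getElem (L : List Int) (i : Nat) (h : i < (pvPairs L).length) :
    (pvPairs L)[i] = (L.getD i 0, (i : Int)) := by
  simp [pvPairs]

lemma pvPairs_length (L : List Int) : (pvPairs L).length = L.length := by
  simp [pvPairs]

lemma pvPairs_set (L : List Int) (r : Nat) (v : Int) (h : r < L.length) :
    pvPairs (L.set r v) = (pvPairs L).set r (v, (r : Int)) := by
  apply List.ext_getElem
  · simp [pvPairs]
  · intro i h1 h2
    have hi : i < L.length := by
      have := h1; simp [pvPairs] at this; exact this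
    rw [pvPairs_getElem _ _ h1, List.getElem_set, pvPairs_getElem _ _ (by simpa [pvPairs_length] using hi)]
    by_cases hri : r = i
    · subst hri
      rw [if_pos rfl]
      rw [List.getD_eq_getElem _ _ (by simpa using hi), List.getElem_set, if_pos rfl]
    · rw [if_neg hri]
      by_cases hil : i < L.length
      · rw [List.getD_eq_getElem _ _ (by simpa using hil), List.getD_eq_getElem _ _ hil,
          List.getElem_set, if_neg hri]
      · omega

-- consecutive pairs of a Pairwise-ordered list
lemma pvZipTail {α : Type} (R : α → α → Prop) :
    ∀ (bs : List α), List.Pairwise R bs → ∀ p ∈ bs.zip bs.tail, R p.1 p.2 := by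
  intro bs
  induction bs with
  | nil => simp
  | cons b rest ih =>
    cases rest with
    | nil => simp
    | cons b2 rest2 =>
      intro hp p hmem
      rcases List.pairwise_cons.mp hp with ⟨h1, h2⟩
      simp only [List.tail_cons, List.zip_cons_cons, List.mem_cons] at hmem
      rcases hmem with rfl | hmem
      · exact h1 b2 (by simp)
      · exact ih h2 p hmem

-- Phase 1: A's contiguous-group scan produces exactly the ranges between B's boundary list
lemma pvGroups_eq (keys : List Int) (n : Int) (hn : n = (keys.length : Int)) :
    ∀ (d : Nat) (j s : Int) (gs : List (List Int)), (n - j).toNat = d →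
    1 ≤ j → j ≤ n → 0 ≤ s → s < j →
    (∀ x : Int, s ≤ x → x < j → PySem.List.pyGetD keys x 0 = PySem.List.pyGetD keys s 0) →
    (let st := (PySem.List.pyRange j n 1).foldl
        (fun (st : List (List Int) × Int × Int) i =>
          if PySem.List.pyGetD keys i 0 ≠ st.2.2 then
            (st.1 ++ [PySem.List.pyRange st.2.1 i 1], i, PySem.List.pyGetD keys i 0)
          else st)
        (gs, s, PySem.List.pyGetD keys s 0);
      st.1 ++ [PySem.List.pyRange st.2.1 n 1])
    = gs ++ ((s :: (((PySem.List.pyRange j n 1).filter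
          (fun i => PySem.List.pyGetD keys i 0 != PySem.List.pyGetD keys (i - 1) 0)) ++ [n])).zip
        (((PySem.List.pyRange j n 1).filter
          (fun i => PySem.List.pyGetD keys i 0 != PySem.List.pyGetD keys (i - 1) 0)) ++ [n])).map
        (fun p => PySem.List.pyRange p.1 p.2 1) := by
  intro d
  induction d using Nat.strong_induction_on with
  | _ d ih =>
    intro j s gs hd h1j hjn h0s hsj hkey
    dsimp only
    by_cases hjlt : j < n
    · rw [PySem.List.pyRange_one_cons hjlt]
      simp only [List.foldl_cons, List.filter_cons]
      have hkeyjm1 : PySem.List.pyGetD keys (j - 1) 0 = PySem.List.pyGetD keys s 0 :=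
        hkey (j - 1) (by omega) (by omega)
      by_cases hc : PySem.List.pyGetD keys j 0 = PySem.List.pyGetD keys s 0
      · have hbne : (PySem.List.pyGetD keys j 0 != PySem.List.pyGetD keys (j - 1) 0) = false := by
          rw [hkeyjm1, hc]; simp
        rw [hbne]
        simp only [Bool.false_eq_true, if_false]
        have hcond : ¬ (PySem.List.pyGetD keys j 0 ≠
            ((gs, s, PySem.List.pyGetD keys s 0) : List (List Int) × Int × Int).2.2) := by
          simpa using hc
        rw [if_neg hcond]
        have := ih (n - (j + 1)).toNat (by omega) (j + 1) s gs rfl (by omega) (by omega) h0s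
          (by omega) (by
            intro x hx1 hx2
            by_cases hxj : x = j
            · subst hxj; exact hc
            · exact hkey x hx1 (by omega))
        exact this
      · have hbne : (PySem.List.pyGetD keys j 0 != PySem.List.pyGetD keys (j - 1) 0) = true := by
          rw [hkeyjm1]; simpa using hc
        rw [hbne]
        simp only [if_true]
        have hcond : (PySem.List.pyGetD keys j 0 ≠
            ((gs, s, PySem.List.pyGetD keys s 0) : List (List Int) × Int × Int).2.2) := by
          simpa using hc
        rw [if_pos hcond]
        have := ih (n - (j + 1)).toNat (by omega) (j + 1) j (gs ++ [PySem.List.pyRange s j 1]) rfl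
          (by omega) (by omega) (by omega) (by omega)
          (by
            intro x hx1 hx2
            have hxj : x = j := by omega
            subst hxj; rfl)
        rw [this]
        simp only [List.zip_cons_cons, List.map_cons, List.append_assoc, List.cons_append,
          List.nil_append]
    · have hjeq : n ≤ j := by omega
      rw [PySem.List.pyRange_one_eq_nil hjeq]
      simp

-- Phase 2: the two assignment loops stay in lock step: A's loads array and B's sorted
-- queue describe the same (load, rank) multiset, so both pick the same rank every time
lemma pvFold_coupling (size : Int) (hs : 1 ≤ size) :
    ∀ (ps : List (Int × Int)) (asg : List (List Int)) (loads : List Int) (q : List (Int × Int)),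
    loads.length = size.toNat →
    List.Pairwise (fun a b => pvLeP a b = true) q →
    q.Perm (pvPairs loads) →
    (∀ p ∈ ps, 0 ≤ p.1 ∧ p.1 ≤ p.2) →
    (ps.foldl
        (fun (st : List (List Int) × List Int) p =>
          let g := PySem.List.pyRange p.1 p.2 1
          let r := (PySem.List.min? (PySem.List.pyRange 0 size 1)
                     (fun x => PySem.List.pyGetD st.2 x 0)).getD 0
          (PySem.List.pySetD st.1 r (PySem.Set.update (PySem.List.pyGetD st.1 r []) g),
           PySem.List.pySetD st.2 r (PySem.List.pyGetD st.2 r 0 + (g.length : Int))))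
        (asg, loads)).1
      = (ps.foldl
        (fun (st : List (List Int) × List (Int × Int)) p =>
          let pop := (PySem.List.pop? st.2 0).getD ((0, 0), [])
          let item := (pop.1.1 + (p.2 - p.1), pop.1.2)
          let q' := PySem.List.insert pop.2 (pvBisect pop.2 item 0 pop.2.length) item
          (PySem.List.pySetD st.1 pop.1.2
             (PySem.Set.update (PySem.List.pyGetD st.1 pop.1.2 []) (PySem.List.pyRange p.1 p.2 1)),
           q'))
        (asg, q)).1 := by
  intro ps
  induction ps with
  | nil => intro asg loads q _ _ _ _; rfl
  | cons p ps' ih =>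
    intro asg loads q hlen hsort hperm hps
    obtain ⟨hp1, hp12⟩ := hps p (by simp)
    have hps' : ∀ p ∈ ps', 0 ≤ p.1 ∧ p.1 ≤ p.2 := fun x hx => hps x (by simp [hx])
    have hqlen : q.length = loads.length := by
      rw [hperm.length_eq, pvPairs_length]
    cases q with
    | nil => simp at hqlen; omega
    | cons hd t =>
      obtain ⟨m, r0⟩ := hd
      have hmem : (m, r0) ∈ pvPairs loads := hperm.mem_iff.mp (by simp)
      have hr0 : 0 ≤ r0 ∧ r0.toNat < loads.length ∧ m = loads.getD r0.toNat 0 := by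
        simp only [pvPairs, List.mem_map, List.mem_range] at hmem
        obtain ⟨i, hi, heq⟩ := hmem
        have h1 : r0 = (i : Int) := (Prod.mk.injEq _ _ _ _).mp heq |>.2 |>.symm
        have h2 : m = loads.getD i 0 := ((Prod.mk.injEq _ _ _ _).mp heq |>.1).symm
        refine ⟨by omega, by omega, ?_⟩
        rw [h2]; congr 1; omega
      obtain ⟨hr0nn, hr0lt, hm⟩ := hr0
      obtain ⟨r, hrmin, hrnn, hrsz, hrall, hrfirst⟩ := pvMin_first loads size hs
      have hg1 : PySem.List.pyGetD loads r0 0 = loads.getD r0.toNat 0 := by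
        rw [PySem.List.pyGetD_of_nonneg _ _ hr0nn]
      have hg2 : PySem.List.pyGetD loads r 0 = loads.getD r.toNat 0 := by
        rw [PySem.List.pyGetD_of_nonneg _ _ hrnn]
      have hr0sz : r0 < size := by omega
      -- identify the rank A picks with the queue head's rank
      have hreq : r = r0 := by
        have hpair_r : (loads.getD r.toNat 0, r) ∈ pvPairs loads := by
          simp only [pvPairs, List.mem_map, List.mem_range]
          exact ⟨r.toNat, by omega, by rw [Int.toNat_of_nonneg hrnn]⟩
        have hcases := hperm.mem_iff.mpr hpair_r
        rcases List.mem_cons.mp hcases with heq | htail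
        · have := (Prod.mk.injEq _ _ _ _).mp heq.symm
          omega
        · have hle := (List.pairwise_cons.mp hsort).1 _ htail
          rw [pvLeP_iff] at hle
          have h1 : PySem.List.pyGetD loads r 0 ≤ PySem.List.pyGetD loads r0 0 :=
            hrall r0 hr0nn hr0sz
          rw [hg1, hg2] at h1
          simp only at hle
          rcases hle with hlt | ⟨heq2, hler⟩
          · omega
          · by_cases hrr : r0 < r
            · have := hrfirst r0 hr0nn hrr
              rw [hg1, hg2] at this
              omega
            · omega
      subst hreq
      -- rewrite one step on each side
      simp only [List.foldl_cons]
      rw [hrmin]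
      simp only [Option.getD_some, PySem.List.pop?_zero_cons]
      have hglen : (((PySem.List.pyRange p.1 p.2 1).length : Nat) : Int) = p.2 - p.1 := by
        rw [PySem.List.length_pyRange_one]; omega
      rw [hglen, hg1, ← hm]
      -- invariants for the tail step
      have hsortt : List.Pairwise (fun a b => pvLeP a b = true) t :=
        (List.pairwise_cons.mp hsort).2
      obtain ⟨hsort', hperm'⟩ := pvIns_sorted_perm t (m + (p.2 - p.1), r) hsortt
      -- the new loads array
      have hset : PySem.List.pySetD loads r (m + (p.2 - p.1)) =
          loads.set r.toNat (m + (p.2 - p.1)) := PySem.List.pySetD_of_nonneg _ _ hr0nn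
      have hPdec : pvPairs loads = (pvPairs loads).take r.toNat ++
          (m, r) :: (pvPairs loads).drop (r.toNat + 1) := by
        conv_lhs => rw [← List.take_append_drop r.toNat (pvPairs loads)]
        rw [List.drop_eq_getElem_cons (by rw [pvPairs_length]; exact hr0lt)]
        rw [pvPairs_getElem _ _ (by rw [pvPairs_length]; exact hr0lt)]
        rw [← hm, Int.toNat_of_nonneg hr0nn]
      have htperm : t.Perm ((pvPairs loads).take r.toNat ++ (pvPairs loads).drop (r.toNat + 1)) := by
        have h1 : ((m, r) :: t).Perm ((m, r) :: ((pvPairs loads).take r.toNat ++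
            (pvPairs loads).drop (r.toNat + 1))) := by
          refine hperm.trans ?_
          conv_lhs => rw [hPdec]
          exact List.perm_middle
        exact h1.cons_inv
      have hpermNew : (PySem.List.insert t
            (pvBisect t (m + (p.2 - p.1), r) 0 t.length) (m + (p.2 - p.1), r)).Perm
          (pvPairs (loads.set r.toNat (m + (p.2 - p.1)))) := by
        rw [pvPairs_set _ _ _ hr0lt, Int.toNat_of_nonneg hr0nn]
        rw [List.set_eq_take_append_cons_drop, if_pos (by rw [pvPairs_length]; exact hr0lt)]
        refine (hperm'.trans (htperm.cons _)).trans ?_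
        exact List.perm_middle.symm
      rw [hset]
      exact ih _ _ _ (by rw [List.length_set]; exact hlen) hsort' hpermNew hps'

-- ===== VERDICT (by name: the statement is the Claim_ definition above) =====
-- initial queue invariants and boundary-list facts, then the two phases combined
theorem assign_key_groups_py_spec : Claim_equal_assign_key_groups_py := by
  unfold Claim_equal_assign_key_groups_py Spec_assign_key_groups_py
  intro keys size _ hpre
  by_cases hk : keys = []
  · simp [assign_key_groups_py, assign_key_groups_py_alt, hk]
  · have hs : 1 ≤ size := hpre.resolve_left hk
    have hn1 : 1 ≤ (keys.length : Int) := by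
      have := List.length_pos_iff.mpr hk
      omega
    unfold assign_key_groups_py assign_key_groups_py_alt
    rw [if_neg hk, if_neg hk]
    dsimp only
    rw [PySem.List.slice_from_one]
    -- Phase 1: A's groups are the ranges between B's boundaries
    have hgroups := pvGroups_eq keys (keys.length : Int) rfl
      ((keys.length : Int) - 1).toNat 1 0 [] rfl (by omega) (by omega) (by omega) (by omega)
      (by intro x h1 h2; congr 1; omega)
    dsimp only at hgroups
    rw [hgroups]
    simp only [List.nil_append]
    rw [List.foldl_map]
    -- the boundary list is strictly increasing and nonnegative
    have hmemF : ∀ y ∈ (PySem.List.pyRange 1 (keys.length : Int) 1).filter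
        (fun i => PySem.List.pyGetD keys i 0 != PySem.List.pyGetD keys (i - 1) 0),
        1 ≤ y ∧ y < (keys.length : Int) := by
      intro y hy
      have := PySem.List.mem_pyRange_one.mp (List.mem_of_mem_filter hy)
      omega
    have hbpw : ((0 : Int) :: (((PySem.List.pyRange 1 (keys.length : Int) 1).filter
        (fun i => PySem.List.pyGetD keys i 0 != PySem.List.pyGetD keys (i - 1) 0)) ++
          [(keys.length : Int)])).Pairwise (· < ·) := by
      rw [List.pairwise_cons]
      constructor
      · intro y hy
        rcases List.mem_append.mp hy with hy1 | hy2
        · have := hmemF y hy1; omega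
        · simp at hy2; omega
      · rw [List.pairwise_append]
        refine ⟨List.Pairwise.filter _ (PySem.List.pairwise_lt_pyRange_one 1 _), by simp, ?_⟩
        intro a ha b hb
        simp at hb
        have := hmemF a ha
        omega
    -- Phase 2: the assignment loops agree
    apply pvFold_coupling size hs
    · simp
    · rw [List.pairwise_map]
      refine (PySem.List.pairwise_lt_pyRange_one 0 size).imp ?_
      intro a b hab
      rw [pvLeP_iff]
      right
      exact ⟨rfl, le_of_lt hab⟩
    · have hq0 : (PySem.List.pyRange 0 size 1).map (fun r => ((0 : Int), r)) =
          pvPairs (List.replicate size.toNat 0) := by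
        have hsz : size = ((size.toNat : Nat) : Int) := by omega
        conv_lhs => rw [hsz, PySem.List.pyRange_zero_natCast, List.map_map]
        simp only [pvPairs, List.length_replicate]
        apply List.map_congr_left
        intro i hi
        have hilt : i < size.toNat := List.mem_range.mp hi
        have hri : i < (List.replicate size.toNat (0 : Int)).length := by simpa using hilt
        rw [List.getD_eq_getElem _ _ hri]
        simp
      rw [hq0]
    · intro p hp
      obtain ⟨a, b⟩ := p
      have h12 := pvZipTail (· < ·) _ hbpw (a, b) hp
      have hma := (List.of_mem_zip hp).1
      rcases List.mem_cons.mp hma with rfl | hma2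
      · exact ⟨le_rfl, le_of_lt h12⟩
      · rcases List.mem_append.mp hma2 with hy1 | hy2
        · have := hmemF a hy1
          exact ⟨by omega, le_of_lt h12⟩
        · simp at hy2
          exact ⟨by omega, le_of_lt h12⟩
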